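-- pv_equiv track=rewrite | github.com/Roma104/PP_homework_Functions | 7.19.PY | f
-- ===== SOURCE A (Python) =====
-- def f(number):
--   #Returns the sum of all repeated digits in a number.
--     # Convert the number to a string to process its digits
--     num_str = str(number)
--
--     # Count occurrences of each digit
--     digit_count = {}
--     for digit in num_str:
--         digit_count[digit] = digit_count.get(digit, 0) + 1
--
--     # Calculate the sum of repeated digits (entire contribution)
--     repeated_sum = 0
--     for digit, count in digit_count.items():
--         if count > 1:
--             repeated_sum += int(digit) * count
--
--     return repeated_sum
-- ===== SOURCE B (Python) =====
-- from itertools import groupby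
--
-- def f(number):
--     # Sort the digits so equal characters form contiguous runs, then
--     # add each run's contribution digit * length when the run repeats.
--     total = 0
--     for ch, run in groupby(sorted(str(number))):
--         n = len(list(run))
--         if n > 1:
--             total += int(ch) * n
--     return total
-- ===== Notes on version B (the rewrite author's own statement) =====
-- stated objective: alternative
-- what changed: B sorts the digit string and sums contributions of contiguous runs via itertools.groupby, instead of A's build-a-count-dict-then-filter-its-items pass.
import Mathlib
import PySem

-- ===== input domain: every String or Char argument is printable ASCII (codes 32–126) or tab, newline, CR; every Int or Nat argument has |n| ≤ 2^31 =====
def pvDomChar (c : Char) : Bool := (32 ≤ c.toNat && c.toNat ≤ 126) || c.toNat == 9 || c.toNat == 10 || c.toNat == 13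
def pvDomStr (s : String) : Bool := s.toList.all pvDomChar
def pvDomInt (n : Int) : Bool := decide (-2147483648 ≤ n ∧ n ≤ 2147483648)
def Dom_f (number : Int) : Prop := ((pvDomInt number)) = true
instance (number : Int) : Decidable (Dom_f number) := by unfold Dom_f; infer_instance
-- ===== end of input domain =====

-- B sorts the digit string and sums contiguous runs (groupby) instead of A's
-- count-dict-then-filter pass; same return value, no speed claim.

-- ===== PORT A =====
-- str(number) as a char list; int(d) on a one-char string is ofChars? [d]
-- (total form via getD 0; the guard count > 1 means the conversion is only
-- reached on digit characters, where Python's int() returns normally too).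
def f (number : Int) : Int :=
  let numStr : List Char := PySem.Int.toChars number
  let digitCount : PySem.Dict Char Int :=
    numStr.foldl (fun d digit => d.insert digit (d.getD digit 0 + 1)) PySem.Dict.empty
  digitCount.items.foldl
    (fun acc p => if p.2 > 1 then acc + (PySem.Int.ofChars? [p.1]).getD 0 * p.2 else acc) 0

-- ===== PORT B =====
-- itertools.groupby over a sorted list: each group is a maximal run of equal
-- adjacent characters; runs returns the (character, run length) pairs in order.
def runs : List Char → List (Char × Int)
  | [] => []
  | c :: rest =>
      (c, 1 + ((rest.takeWhile (· == c)).length : Int)) :: runs (rest.dropWhile (· == c))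
termination_by l => l.length
decreasing_by
  simp only [List.length_cons]
  exact Nat.lt_succ_of_le (List.length_dropWhile_le _ _)

def f_alt (number : Int) : Int :=
  let s : List Char := PySem.List.sorted (PySem.Int.toChars number) (fun c => c) false
  (runs s).foldl
    (fun acc p => if p.2 > 1 then acc + (PySem.Int.ofChars? [p.1]).getD 0 * p.2 else acc) 0

-- ===== PRECONDITION & SPEC =====
def Spec_f (number : Int) (out : Int) : Prop := out = f_alt number
instance (number : Int) (out : Int) : Decidable (Spec_f number out) := by unfold Spec_f; infer_instance

-- ===== CLAIM (what is proved, stated in full; the proofs are below) =====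
def Claim_equal_f : Prop := ∀ (number : Int), Dom_f number → Spec_f number (f number)

-- ===== LEMMAS AND PROOFS =====

-- the per-entry contribution both loops accumulate
def pvTerm (p : Char × Int) : Int :=
  if p.2 > 1 then (PySem.Int.ofChars? [p.1]).getD 0 * p.2 else 0

theorem pvFold_eq_sum (l : List (Char × Int)) :
    l.foldl (fun acc p => if p.2 > 1 then acc + (PySem.Int.ofChars? [p.1]).getD 0 * p.2 else acc) 0
      = (l.map pvTerm).sum := by
  have h := PySem.List.foldl_congr_mem
    (l := l) (init := (0 : Int))
    (f := fun acc p => if p.2 > 1 then acc + (PySem.Int.ofChars? [p.1]).getD 0 * p.2 else acc)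
    (g := fun acc p => acc + pvTerm p)
    (by intro acc p _; by_cases hp : p.2 > 1 <;> simp [pvTerm, hp])
  rw [h, PySem.List.foldl_add l pvTerm 0]
  simp

theorem pvDiscard_of_not_mem (s : List Char) (c : Char) (h : c ∉ s) :
    PySem.Set.discard s c = s := by
  simp only [PySem.Set.discard]
  refine List.filter_eq_self.2 ?_
  intro x hx
  simp only [Bool.not_eq_true', beq_eq_false_iff_ne]
  exact ne_of_mem_of_not_mem hx h

theorem pvOfList_const_append (c : Char) (p d : List Char) (hp : ∀ x ∈ p, x = c) :
    PySem.Set.discard (PySem.Set.ofList (p ++ d)) c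
      = PySem.Set.discard (PySem.Set.ofList d) c := by
  induction p with
  | nil => rfl
  | cons y p ih =>
      have hy : y = c := hp y (by simp)
      subst hy
      rw [List.cons_append, PySem.Set.ofList_cons]
      simp only [PySem.Set.discard, List.filter_cons, BEq.rfl, Bool.not_true,
        List.filter_filter]
      rw [show (fun a => !a == y && !a == y) = (fun a => !a == y) from by
        funext a; cases (a == y) <;> rfl]
      exact ih (fun x hx => hp x (by simp [hx]))

theorem pvNotMem_dropWhile (c : Char) (l : List Char)
    (hs : l.Pairwise (· ≤ ·)) (hlb : ∀ x ∈ l, c ≤ x) :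
    c ∉ l.dropWhile (· == c) := by
  cases hd : l.dropWhile (· == c) with
  | nil => simp
  | cons h t =>
      have hne : l.dropWhile (· == c) ≠ [] := by rw [hd]; simp
      have h0 := List.head_dropWhile_not (fun x => x == c) hne
      simp only [hd, List.head_cons, beq_eq_false_iff_ne] at h0
      have hsub : (h :: t).Sublist l := hd ▸ List.dropWhile_sublist _
      have hpw : (h :: t).Pairwise (· ≤ ·) := hs.sublist hsub
      intro hc
      rcases List.mem_cons.1 hc with rfl | hct
      · exact h0 rfl
      · have h1 : h ≤ c := (List.pairwise_cons.1 hpw).1 c hct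
        have h2 : c ≤ h := hlb h (hsub.mem (by simp))
        exact h0 (le_antisymm h1 h2)

theorem pvRuns_sorted : ∀ (l : List Char), l.Pairwise (· ≤ ·) →
    runs l = (PySem.Set.ofList l).map (fun c => (c, (l.count c : Int))) := by
  intro l
  induction l using runs.induct with
  | case1 => intro _; simp [runs]
  | case2 c rest ih =>
      intro hs
      rw [runs]
      set tk := rest.takeWhile (· == c) with htk_def
      set d := rest.dropWhile (· == c) with hd_def
      have hrest : rest.Pairwise (· ≤ ·) := (List.pairwise_cons.1 hs).2
      have hlb : ∀ x ∈ rest, c ≤ x := (List.pairwise_cons.1 hs).1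
      have hsplit : rest = tk ++ d := (List.takeWhile_append_dropWhile).symm
      have htk : ∀ x ∈ tk, x = c := by
        intro x hx
        have := List.mem_takeWhile_imp hx
        simpa using this
      have hcd : c ∉ d := pvNotMem_dropWhile c rest hrest hlb
      have hdpw : d.Pairwise (· ≤ ·) := hrest.sublist (List.dropWhile_sublist _)
      rw [ih hdpw, PySem.Set.ofList_cons]
      rw [show PySem.Set.discard (PySem.Set.ofList rest) c = PySem.Set.ofList d from by
        conv_lhs => rw [hsplit]
        rw [pvOfList_const_append c _ _ htk]
        exact pvDiscard_of_not_mem _ _ (fun hm => hcd ((PySem.Set.mem_ofList _ _).1 hm))]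
      rw [List.map_cons]
      congr 1
      · -- head entry: count of c in c :: rest is 1 + the equal-run length
        have h1 : rest.count c = tk.length := by
          conv_lhs => rw [hsplit]
          rw [List.count_append, List.count_eq_zero.2 hcd,
            List.count_eq_length.2 (fun b hb => (htk b hb).symm)]
          omega
        simp [List.count_cons_self, h1]
        omega
      · -- tail entries: counts in the dropWhile suffix agree with counts in l
        refine List.map_congr_left ?_
        intro k hk
        have hkd : k ∈ d := (PySem.Set.mem_ofList _ _).1 hk
        have hkc : k ≠ c := fun he => hcd (he ▸ hkd)
        have h2 : (c :: rest).count k = d.count k := by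
          rw [List.count_cons_of_ne (Ne.symm hkc)]
          conv_lhs => rw [hsplit]
          rw [List.count_append, List.count_eq_zero.2 (fun hm => hkc (htk k hm))]
          omega
        simp [h2]

theorem f_spec_aux (number : Int) : f number = f_alt number := by
  simp only [f, f_alt]
  rw [PySem.Dict.foldl_insert_getD_add_one_eq_counter]
  rw [PySem.Dict.items_counter]
  have hsp : (PySem.List.sorted (PySem.Int.toChars number) (fun c => c) false).Pairwise (· ≤ ·) :=
    PySem.List.sorted_pairwise (PySem.Int.toChars number) (fun c => c)
  rw [pvRuns_sorted _ hsp]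
  rw [pvFold_eq_sum, pvFold_eq_sum]
  rw [List.map_map, List.map_map]
  have hperm : (PySem.Set.ofList (PySem.Int.toChars number)).Perm
      (PySem.Set.ofList (PySem.List.sorted (PySem.Int.toChars number) (fun c => c) false)) := by
    refine (List.perm_ext_iff_of_nodup (PySem.Set.nodup_ofList _) (PySem.Set.nodup_ofList _)).2 ?_
    intro a
    rw [PySem.Set.mem_ofList, PySem.Set.mem_ofList]
    exact ((PySem.List.sorted_perm (PySem.Int.toChars number) (fun c => c) false).mem_iff).symm
  have hcnt : ∀ k, ((PySem.List.sorted (PySem.Int.toChars number) (fun c => c) false).count k : Int)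
      = ((PySem.Int.toChars number).count k : Int) := by
    intro k
    rw [(PySem.List.sorted_perm (PySem.Int.toChars number) (fun c => c) false).count_eq]
  calc ((PySem.Set.ofList (PySem.Int.toChars number)).map
          (pvTerm ∘ fun k => (k, ((PySem.Int.toChars number).count k : Int)))).sum
      = ((PySem.Set.ofList (PySem.List.sorted (PySem.Int.toChars number) (fun c => c) false)).map
          (pvTerm ∘ fun k => (k, ((PySem.Int.toChars number).count k : Int)))).sum :=
        (hperm.map _).sum_eq
    _ = _ := by
        refine congrArg List.sum (List.map_congr_left ?_)
        intro k _
        simp [hcnt k]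

-- ===== VERDICT (by name: the statement is the Claim_ definition above) =====
theorem f_spec : Claim_equal_f := by
  intro number _
  exact f_spec_aux number
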